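-- pv_equiv track=rewrite | github.com/SonDo580/dsa-leetcode | 7-Greedy/06.max-num-with-69.py | max_num_from_69
-- ===== SOURCE A (Python) =====
-- def max_num_from_69(num: int) -> int:
--     max_num = num
--     position = 0  # right to left
--     position_to_flipped = -1
--
--     while num > 0:
--         digit = num % 10
--         if digit == 6:
--             position_to_flipped = position
--         num //= 10
--         position += 1
--
--     if position_to_flipped != -1:
--         max_num += 3 * 10**position_to_flipped
--
--     return max_num
-- ===== SOURCE B (Python) =====
-- def max_num_from_69(num: int) -> int:
--     # Recursive: flip the leftmost 6 by first flipping the quotient;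
--     # if nothing changed there, flip the last digit if it is a 6.
--     if num <= 0:
--         return num
--     q, r = divmod(num, 10)
--     fq = max_num_from_69(q)
--     if fq != q:
--         return fq * 10 + r
--     if r == 6:
--         return q * 10 + 9
--     return num
-- ===== Notes on version B (the rewrite author's own statement) =====
-- stated objective: alternative
-- what changed: B replaces A's iterative right-to-left digit scan that tracks a flip position and then adds three at that position's power of ten with a recursion on the quotient that rebuilds the flipped number directly, with no position counter and no power computation.
import Mathlib
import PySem

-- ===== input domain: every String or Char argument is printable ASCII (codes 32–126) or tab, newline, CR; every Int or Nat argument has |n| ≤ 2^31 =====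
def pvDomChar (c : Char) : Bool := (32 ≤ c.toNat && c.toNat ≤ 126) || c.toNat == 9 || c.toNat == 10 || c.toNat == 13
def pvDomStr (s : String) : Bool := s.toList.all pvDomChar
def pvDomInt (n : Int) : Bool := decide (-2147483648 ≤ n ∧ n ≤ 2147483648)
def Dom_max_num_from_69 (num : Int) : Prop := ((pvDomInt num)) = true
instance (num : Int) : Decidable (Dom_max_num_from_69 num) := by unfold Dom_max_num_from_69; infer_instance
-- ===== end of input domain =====

-- B flips the leftmost 6 by recursion on the quotient instead of A's positional scan plus 3*10**p; alternative decomposition, same cost.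


theorem pvFloordiv10_toNat_lt (num : Int) (h : 0 < num) :
    (PySem.Int.floordiv num 10).toNat < num.toNat := by
  have : PySem.Int.floordiv num 10 = num / 10 := by
    simp [PySem.Int.floordiv, Int.fdiv_eq_ediv]
  rw [this]
  omega

-- ===== PORT A =====
-- the while loop, carried as recursion on (num, position, position_to_flipped); returns the final position_to_flipped
def pvLoopA (num pos ptf : Int) : Int :=
  if h0 : 0 < num then
    let digit := PySem.Int.mod num 10
    pvLoopA (PySem.Int.floordiv num 10) (pos + 1) (if digit = 6 then pos else ptf)
  else ptf
termination_by num.toNat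
decreasing_by exact pvFloordiv10_toNat_lt num h0

def max_num_from_69 (num : Int) : Int :=
  let max_num := num
  let position_to_flipped := pvLoopA num 0 (-1)
  -- 10**position_to_flipped: whenever the branch is taken, position_to_flipped ≥ 0, so toNat is exact
  if position_to_flipped ≠ -1 then max_num + 3 * 10 ^ position_to_flipped.toNat else max_num

-- ===== PORT B =====
def max_num_from_69_alt (num : Int) : Int :=
  if _h : num ≤ 0 then num
  else
    let q := PySem.Int.floordiv num 10
    let r := PySem.Int.mod num 10
    let fq := max_num_from_69_alt q
    if fq ≠ q then fq * 10 + r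
    else if r = 6 then q * 10 + 9
    else num
termination_by num.toNat
decreasing_by exact pvFloordiv10_toNat_lt num (by omega)

-- ===== PRECONDITION & SPEC =====
def Spec_max_num_from_69 (num : Int) (out : Int) : Prop := out = max_num_from_69_alt num
instance (num : Int) (out : Int) : Decidable (Spec_max_num_from_69 num out) := by unfold Spec_max_num_from_69; infer_instance

-- ===== CLAIM (what is proved, stated in full; the proofs are below) =====
def Claim_equal_max_num_from_69 : Prop := ∀ (num : Int), Dom_max_num_from_69 num → Spec_max_num_from_69 num (max_num_from_69 num)

-- ===== LEMMAS AND PROOFS =====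

-- position (from the right) of the leftmost digit 6 of n, if any
def hi6? (n : Nat) : Option Nat :=
  if h : n = 0 then none
  else match hi6? (n / 10) with
    | some k => some (k + 1)
    | none => if n % 10 = 6 then some 0 else none
termination_by n
decreasing_by exact Nat.div_lt_self (Nat.pos_of_ne_zero h) (by norm_num)

theorem pvFloordiv_cast (n : Nat) : PySem.Int.floordiv (n : Int) 10 = ((n / 10 : Nat) : Int) := by
  have : PySem.Int.floordiv (n : Int) 10 = (n : Int) / 10 := by
    simp [PySem.Int.floordiv, Int.fdiv_eq_ediv]
  rw [this]; omega

theorem pvMod_cast (n : Nat) : PySem.Int.mod (n : Int) 10 = ((n % 10 : Nat) : Int) := by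
  have : PySem.Int.mod (n : Int) 10 = (n : Int) % 10 := by
    simp [PySem.Int.mod, Int.fmod_eq_emod]
  rw [this]; omega

theorem hi6?_pos (n : Nat) (h : n ≠ 0) :
    hi6? n = match hi6? (n / 10) with
      | some k => some (k + 1)
      | none => if n % 10 = 6 then some 0 else none := by
  rw [hi6?, dif_neg h]

theorem pvLoopA_eq (n : Nat) : ∀ pos ptf : Int,
    pvLoopA (n : Int) pos ptf =
      match hi6? n with
      | some k => pos + k
      | none => ptf := by
  induction n using Nat.strong_induction_on with
  | _ n ih =>
    intro pos ptf
    by_cases h0 : n = 0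
    · subst h0
      rw [pvLoopA, hi6?]
      simp
    · have hpos : (0:Int) < (n:Int) := by exact_mod_cast Nat.pos_of_ne_zero h0
      rw [pvLoopA, dif_pos hpos]
      simp only [pvFloordiv_cast, pvMod_cast]
      rw [ih (n / 10) (Nat.div_lt_self (Nat.pos_of_ne_zero h0) (by norm_num))]
      rw [hi6?_pos n h0]
      cases hq : hi6? (n / 10) with
      | some k => push_cast; ring
      | none =>
        by_cases h6 : n % 10 = 6
        · have h6' : ((n : Int) % 10) = 6 := by omega
          simp [h6, h6']
        · have h6' : ¬ ((n : Int) % 10 = 6) := by omega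
          simp [h6, h6']

theorem pvAlt_eq (n : Nat) (hn : 0 < n) :
    max_num_from_69_alt (n : Int) =
      (n : Int) + (match hi6? n with
        | some k => 3 * 10 ^ k
        | none => 0) := by
  induction n using Nat.strong_induction_on with
  | _ n ih =>
    have h0 : ¬ ((n : Int) ≤ 0) := by omega
    have hsplit : (n : Int) = ((n / 10 : Nat) : Int) * 10 + ((n % 10 : Nat) : Int) := by omega
    rw [max_num_from_69_alt, dif_neg h0]
    simp only [pvFloordiv_cast, pvMod_cast]
    have hfq : max_num_from_69_alt ((n / 10 : Nat) : Int) =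
        ((n / 10 : Nat) : Int) + (match hi6? (n / 10) with
          | some k => 3 * 10 ^ k
          | none => 0) := by
      by_cases hq0 : n / 10 = 0
      · rw [hq0, hi6?]
        rw [max_num_from_69_alt]
        simp
      · exact ih (n / 10) (Nat.div_lt_self hn (by norm_num)) (Nat.pos_of_ne_zero hq0)
    rw [hfq, hi6?_pos n (by omega)]
    cases hq : hi6? (n / 10) with
    | some k =>
      have hne : ((n / 10 : Nat) : Int) + 3 * 10 ^ k ≠ ((n / 10 : Nat) : Int) := by
        have : (0:Int) < 3 * 10 ^ k := by positivity
        omega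
      simp only [if_pos hne]
      rw [hsplit]; ring
    | none =>
      by_cases h6 : n % 10 = 6
      · have h6' : ((n : Int) % 10) = 6 := by omega
        simp only [add_zero, ne_eq, not_true_eq_false, if_false]
        simp [h6, h6']
        omega
      · have h6' : ¬ ((n : Int) % 10 = 6) := by omega
        simp only [add_zero, ne_eq, not_true_eq_false, if_false]
        simp [h6, h6']

-- ===== VERDICT (by name: the statement is the Claim_ definition above) =====
theorem max_num_from_69_spec : Claim_equal_max_num_from_69 := by
  intro num _
  unfold Spec_max_num_from_69 max_num_from_69
  by_cases hpos : 0 < num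
  · have hn : num = ((num.toNat : Nat) : Int) := by omega
    have hn' : 0 < num.toNat := by omega
    rw [hn, pvLoopA_eq, pvAlt_eq _ hn']
    cases hk : hi6? num.toNat with
    | some k =>
      have : ((0:Int) + k) ≠ -1 := by omega
      simp only [if_pos this]
      have : ((0:Int) + k).toNat = k := by omega
      rw [this]
    | none => simp
  · rw [pvLoopA, dif_neg hpos]
    rw [max_num_from_69_alt, dif_pos (by omega)]
    simp
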